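-- pv_equiv track=rewrite | github.com/junseo0421/Algorithm | 프로그래머스/0/120956. 옹알이 （1）/옹알이 （1）.py | solution
-- ===== SOURCE A (Python) =====
-- babbling_list = ["aya", "ye", "woo", "ma"]
--
-- def solution(babbling):
--     result = 0
--     for i in babbling:
--         count = ""
--         for j in i:
--             count += j
--             if count in babbling_list:
--                 count = ""
--
--         if count == "":
--             result += 1
--
--     return result
-- ===== SOURCE B (Python) =====
-- def solution(babbling):
--     def ok(s):
--         if s == "":
--             return True
--         if s.startswith("aya"):
--             return ok(s[3:])
--         if s.startswith("ye"):
--             return ok(s[2:])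
--         if s.startswith("woo"):
--             return ok(s[3:])
--         if s.startswith("ma"):
--             return ok(s[2:])
--         return False
--     return sum(1 for w in babbling if ok(w))
-- ===== Notes on version B (the rewrite author's own statement) =====
-- stated objective: idiomatic
-- what changed: Replaces the char-by-char accumulator scan with a recursive predicate that strips one matching syllable prefix at a time (valid since the syllable set is prefix-free), and counts with a sum over a generator.
import Mathlib
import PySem

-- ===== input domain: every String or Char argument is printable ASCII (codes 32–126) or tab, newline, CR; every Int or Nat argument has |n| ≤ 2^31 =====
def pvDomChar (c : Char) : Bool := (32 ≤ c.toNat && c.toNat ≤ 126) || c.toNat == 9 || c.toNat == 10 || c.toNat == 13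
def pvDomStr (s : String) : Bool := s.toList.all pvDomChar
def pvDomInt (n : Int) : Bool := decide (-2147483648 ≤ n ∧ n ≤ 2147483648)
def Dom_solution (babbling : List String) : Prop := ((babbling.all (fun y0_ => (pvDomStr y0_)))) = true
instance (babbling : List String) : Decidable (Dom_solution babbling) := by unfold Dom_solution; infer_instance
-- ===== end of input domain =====

-- B replaces A's char-by-char accumulator scan with a recursive predicate that strips one
-- matching syllable prefix at a time (idiomatic; same cost); equivalent because the syllable
-- set is prefix-free.

-- ===== PORT A =====
-- babbling_list = ["aya", "ye", "woo", "ma"]   (strings handled as their character lists)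
def babblingList : List (List Char) := [['a','y','a'], ['y','e'], ['w','o','o'], ['m','a']]

-- body of A's inner loop: count += j; if count in babbling_list: count = ""
def stepA (count : List Char) (j : Char) : List Char :=
  let count := count ++ [j]
  if babblingList.contains count then [] else count

def solution (babbling : List String) : Int :=
  babbling.foldl
    (fun result i =>
      let count := i.toList.foldl stepA []
      if count = [] then result + 1 else result)
    0

-- ===== PORT B =====
-- ok(s): "" is ok; strip a matching syllable prefix and recurse; otherwise False
def okB (s : List Char) : Bool :=
  if s = [] then true
  else if PySem.Chars.startswith s ['a','y','a'] then okB (s.drop 3)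
  else if PySem.Chars.startswith s ['y','e'] then okB (s.drop 2)
  else if PySem.Chars.startswith s ['w','o','o'] then okB (s.drop 3)
  else if PySem.Chars.startswith s ['m','a'] then okB (s.drop 2)
  else false
termination_by s.length
decreasing_by
  all_goals
    have : s ≠ [] := by assumption
    have : 0 < s.length := List.length_pos_iff.mpr this
    simp [List.length_drop]; omega

def solution_alt (babbling : List String) : Int :=
  ((babbling.filter (fun w => okB w.toList)).map (fun _ => (1 : Int))).sum

-- ===== PRECONDITION & SPEC =====
def Spec_solution (babbling : List String) (out : Int) : Prop := out = solution_alt babbling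
instance (babbling : List String) (out : Int) : Decidable (Spec_solution babbling out) := by unfold Spec_solution; infer_instance

-- ===== CLAIM (what is proved, stated in full; the proofs are below) =====
def Claim_equal_solution : Prop := ∀ (babbling : List String), Dom_solution babbling → Spec_solution babbling (solution babbling)

-- ===== LEMMAS AND PROOFS =====

lemma stepA_eq (p : List Char) (j : Char) :
    stepA p j = if (p ++ [j]) ∈ babblingList then [] else p ++ [j] := by
  simp [stepA]

-- a state that is nonempty and not a prefix of any syllable stays that way: the scan never resets
def DeadState (p : List Char) : Prop := p ≠ [] ∧ ∀ s ∈ babblingList, ¬ p <+: s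

lemma dead_step {p : List Char} (h : DeadState p) (j : Char) : DeadState (stepA p j) := by
  obtain ⟨hne, hp⟩ := h
  rw [stepA_eq, if_neg (fun hmem => hp _ hmem (List.prefix_append _ _))]
  refine ⟨by simp, fun s hs hpre => hp s hs ((List.prefix_append p [j]).trans hpre)⟩

lemma dead_run : ∀ (cs : List Char) (p : List Char), DeadState p → cs.foldl stepA p ≠ [] := by
  intro cs
  induction cs with
  | nil => intro p h; exact h.1
  | cons c cs ih => intro p h; exact ih _ (dead_step h c)

lemma dead1 {c : Char} (h1 : c ≠ 'a') (h2 : c ≠ 'y') (h3 : c ≠ 'w') (h4 : c ≠ 'm') :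
    DeadState [c] := by
  refine ⟨by simp, ?_⟩
  intro s hs
  fin_cases hs <;> simp [List.cons_prefix_cons, h1, h2, h3, h4]

lemma dead_ax {c : Char} (h : c ≠ 'y') : DeadState ['a', c] := by
  refine ⟨by simp, ?_⟩
  intro s hs
  fin_cases hs <;> simp [List.cons_prefix_cons, h]

lemma dead_ayx {c : Char} (h : c ≠ 'a') : DeadState ['a', 'y', c] := by
  refine ⟨by simp, ?_⟩
  intro s hs
  fin_cases hs <;> simp [List.cons_prefix_cons, h]

lemma dead_yx {c : Char} (h : c ≠ 'e') : DeadState ['y', c] := by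
  refine ⟨by simp, ?_⟩
  intro s hs
  fin_cases hs <;> simp [List.cons_prefix_cons, h]

lemma dead_wx {c : Char} (h : c ≠ 'o') : DeadState ['w', c] := by
  refine ⟨by simp, ?_⟩
  intro s hs
  fin_cases hs <;> simp [List.cons_prefix_cons, h]

lemma dead_wox {c : Char} (h : c ≠ 'o') : DeadState ['w', 'o', c] := by
  refine ⟨by simp, ?_⟩
  intro s hs
  fin_cases hs <;> simp [List.cons_prefix_cons, h]

lemma dead_mx {c : Char} (h : c ≠ 'a') : DeadState ['m', c] := by
  refine ⟨by simp, ?_⟩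
  intro s hs
  fin_cases hs <;> simp [List.cons_prefix_cons, h]

-- concrete single steps of A's scan
lemma step1 (c : Char) : stepA [] c = [c] := by
  rw [stepA_eq]
  simp [babblingList]

lemma step_a (c : Char) : stepA ['a'] c = ['a', c] := by
  rw [stepA_eq]; simp [babblingList]

lemma step_w (c : Char) : stepA ['w'] c = ['w', c] := by
  rw [stepA_eq]; simp [babblingList]

lemma step_y (c : Char) : stepA ['y'] c = if c = 'e' then [] else ['y', c] := by
  rw [stepA_eq]; simp [babblingList]

lemma step_m (c : Char) : stepA ['m'] c = if c = 'a' then [] else ['m', c] := by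
  rw [stepA_eq]; simp [babblingList]

lemma step_ay (c : Char) : stepA ['a','y'] c = if c = 'a' then [] else ['a','y',c] := by
  rw [stepA_eq]; simp [babblingList]

lemma step_wo (c : Char) : stepA ['w','o'] c = if c = 'o' then [] else ['w','o',c] := by
  rw [stepA_eq]; simp [babblingList]

lemma okB_nil : okB [] = true := by rw [okB]; simp

lemma main : ∀ (cs : List Char), (cs.foldl stepA [] = []) ↔ okB cs = true := by
  have H : ∀ (n : ℕ) (cs : List Char), cs.length ≤ n →
      ((cs.foldl stepA [] = []) ↔ okB cs = true) := by
    intro n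
    induction n with
    | zero =>
      intro cs h
      have : cs = [] := List.length_eq_zero_iff.mp (Nat.le_zero.mp h)
      subst this; simp [okB_nil]
    | succ n ih =>
      intro cs hlen
      rcases cs with _ | ⟨c, t⟩
      · simp [okB_nil]
      · simp only [List.length_cons] at hlen
        by_cases hca : c = 'a'
        · subst hca
          rcases t with _ | ⟨c2, t2⟩
          · simp only [List.foldl_cons, List.foldl_nil, step1]
            rw [okB]
            simp [PySem.Chars.startswith_iff, List.cons_prefix_cons]
          · simp only [List.length_cons] at hlen
            by_cases hc2 : c2 = 'y'
            · subst hc2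
              rcases t2 with _ | ⟨c3, t3⟩
              · simp only [List.foldl_cons, List.foldl_nil, step1, step_a]
                rw [okB]
                simp [PySem.Chars.startswith_iff, List.cons_prefix_cons]
              · simp only [List.length_cons] at hlen
                by_cases hc3 : c3 = 'a'
                · subst hc3
                  simp only [List.foldl_cons, step1, step_a, step_ay]
                  rw [okB]
                  simp only [PySem.Chars.startswith_iff]
                  simp [List.cons_prefix_cons]
                  exact ih t3 (by omega)
                · simp only [List.foldl_cons, step1, step_a, step_ay, if_neg hc3]
                  refine iff_of_false (dead_run _ _ (dead_ayx hc3)) ?_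
                  rw [okB]
                  simp [PySem.Chars.startswith_iff, List.cons_prefix_cons, Ne.symm hc3]
            · simp only [List.foldl_cons, step1, step_a]
              refine iff_of_false (dead_run _ _ (dead_ax hc2)) ?_
              rw [okB]
              simp [PySem.Chars.startswith_iff, List.cons_prefix_cons, Ne.symm hc2]
        · by_cases hcy : c = 'y'
          · subst hcy
            rcases t with _ | ⟨c2, t2⟩
            · simp only [List.foldl_cons, List.foldl_nil, step1]
              rw [okB]
              simp [PySem.Chars.startswith_iff, List.cons_prefix_cons]
            · simp only [List.length_cons] at hlen
              by_cases hc2 : c2 = 'e'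
              · subst hc2
                simp only [List.foldl_cons, step1, step_y]
                rw [okB]
                simp only [PySem.Chars.startswith_iff]
                simp [List.cons_prefix_cons]
                exact ih t2 (by omega)
              · simp only [List.foldl_cons, step1, step_y, if_neg hc2]
                refine iff_of_false (dead_run _ _ (dead_yx hc2)) ?_
                rw [okB]
                simp [PySem.Chars.startswith_iff, List.cons_prefix_cons, Ne.symm hc2]
          · by_cases hcw : c = 'w'
            · subst hcw
              rcases t with _ | ⟨c2, t2⟩
              · simp only [List.foldl_cons, List.foldl_nil, step1]
                rw [okB]
                simp [PySem.Chars.startswith_iff, List.cons_prefix_cons]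
              · simp only [List.length_cons] at hlen
                by_cases hc2 : c2 = 'o'
                · subst hc2
                  rcases t2 with _ | ⟨c3, t3⟩
                  · simp only [List.foldl_cons, List.foldl_nil, step1, step_w]
                    rw [okB]
                    simp [PySem.Chars.startswith_iff, List.cons_prefix_cons]
                  · simp only [List.length_cons] at hlen
                    by_cases hc3 : c3 = 'o'
                    · subst hc3
                      simp only [List.foldl_cons, step1, step_w, step_wo]
                      rw [okB]
                      simp only [PySem.Chars.startswith_iff]
                      simp [List.cons_prefix_cons]
                      exact ih t3 (by omega)
                    · simp only [List.foldl_cons, step1, step_w, step_wo, if_neg hc3]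
                      refine iff_of_false (dead_run _ _ (dead_wox hc3)) ?_
                      rw [okB]
                      simp [PySem.Chars.startswith_iff, List.cons_prefix_cons, Ne.symm hc3]
                · simp only [List.foldl_cons, step1, step_w]
                  refine iff_of_false (dead_run _ _ (dead_wx hc2)) ?_
                  rw [okB]
                  simp [PySem.Chars.startswith_iff, List.cons_prefix_cons, Ne.symm hc2]
            · by_cases hcm : c = 'm'
              · subst hcm
                rcases t with _ | ⟨c2, t2⟩
                · simp only [List.foldl_cons, List.foldl_nil, step1]
                  rw [okB]
                  simp [PySem.Chars.startswith_iff, List.cons_prefix_cons]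
                · simp only [List.length_cons] at hlen
                  by_cases hc2 : c2 = 'a'
                  · subst hc2
                    simp only [List.foldl_cons, step1, step_m]
                    rw [okB]
                    simp only [PySem.Chars.startswith_iff]
                    simp [List.cons_prefix_cons]
                    exact ih t2 (by omega)
                  · simp only [List.foldl_cons, step1, step_m, if_neg hc2]
                    refine iff_of_false (dead_run _ _ (dead_mx hc2)) ?_
                    rw [okB]
                    simp [PySem.Chars.startswith_iff, List.cons_prefix_cons, Ne.symm hc2]
              · simp only [List.foldl_cons, step1]
                refine iff_of_false (dead_run _ _ (dead1 hca hcy hcw hcm)) ?_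
                rw [okB]
                simp [PySem.Chars.startswith_iff, List.cons_prefix_cons, Ne.symm hca, Ne.symm hcy, Ne.symm hcw, Ne.symm hcm]
  intro cs; exact H cs.length cs le_rfl

lemma outer : ∀ (l : List String) (r : Int),
    l.foldl (fun result i =>
      let count := i.toList.foldl stepA []
      if count = [] then result + 1 else result) r
      = r + ((l.filter (fun w => okB w.toList)).map (fun _ => (1 : Int))).sum := by
  intro l
  induction l with
  | nil => intro r; simp
  | cons w l ih =>
    intro r
    simp only [List.foldl_cons, List.filter_cons]
    by_cases h : okB w.toList
    · rw [show (if w.toList.foldl stepA [] = [] then r + 1 else r) = r + 1 from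
        if_pos ((main _).mpr h)]
      simp [h, ih]; ring
    · rw [show (if w.toList.foldl stepA [] = [] then r + 1 else r) = r from
        if_neg (fun he => h ((main _).mp he))]
      simp [h, ih]

-- ===== VERDICT (by name: the statement is the Claim_ definition above) =====
theorem solution_spec : Claim_equal_solution := by
  intro babbling _
  show solution babbling = solution_alt babbling
  unfold solution solution_alt
  rw [outer babbling 0]
  simp
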